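-- pv_equiv track=rewrite | github.com/popkristina/NER_for_movies | Scripts/assemble.py | ensemble_appr
-- ===== SOURCE A (Python) =====
-- def ensemble_appr(roberta, bert_multilingual, elmo):
--     all_models = dict()
--     for submission in roberta.keys():
--         all_models[submission] = dict()
--         if 'positive_movies' in elmo[submission].keys():
--             all_models[submission]['positive_movies'] = elmo[submission]['positive_movies']
--         if 'negative_movies' in roberta[submission].keys():
--             all_models[submission]['negative_movies'] = roberta[submission]['negative_movies']
--         if 'positive_genres' in elmo[submission].keys():
--             all_models[submission]['positive_genres'] = elmo[submission]['positive_genres']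
--         if 'negative_genres' in bert_multilingual[submission].keys():
--             all_models[submission]['negative_genres'] = bert_multilingual[submission]['negative_genres']
--         # if 'negative_genres' in bert_large[submission].keys():
--         #    all_models[submission]['negative_genres'] = bert_large[submission]['negative_genres']
--         if 'positive_keywords' in elmo[submission].keys():
--             all_models[submission]['positive_keywords'] = elmo[submission]['positive_keywords']
--         if 'negative_keywords' in roberta[submission].keys():
--             all_models[submission]['negative_keywords'] = roberta[submission]['negative_keywords']
--         # if 'negative_keywords' in bert_large[submission].keys():
--         #    all_models[submission]['negative_keywords'] = bert_large[submission]['negative_keywords']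
--         if 'positive_actors' in bert_multilingual[submission].keys():
--             all_models[submission]['positive_actors'] = bert_multilingual[submission]['positive_actors']
--         if 'negative_actors' in roberta[submission].keys():
--             all_models[submission]['negative_actors'] = roberta[submission]['negative_actors']
--     return all_models
-- ===== SOURCE B (Python) =====
-- OWNER = {'positive_movies': 'e', 'negative_movies': 'r',
--          'positive_genres': 'e', 'negative_genres': 'b',
--          'positive_keywords': 'e', 'negative_keywords': 'r',
--          'positive_actors': 'b', 'negative_actors': 'r'}
-- FIELD_ORDER = ['positive_movies', 'negative_movies', 'positive_genres',
--                'negative_genres', 'positive_keywords', 'negative_keywords',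
--                'positive_actors', 'negative_actors']
--
-- def ensemble_appr(roberta, bert_multilingual, elmo):
--     out = {}
--     for sub, rsub in roberta.items():
--         picked = {}
--         for tag, model in (('r', rsub), ('b', bert_multilingual[sub]), ('e', elmo[sub])):
--             for f, v in model.items():
--                 if OWNER.get(f) == tag:
--                     picked[f] = v
--         out[sub] = {f: picked[f] for f in FIELD_ORDER if f in picked}
--     return out
-- ===== Notes on version B (the rewrite author's own statement) =====
-- stated objective: alternative
-- what changed: Instead of probing each of the eight fields in its source dict, B inverts the traversal: it scans each source dict's own entries, keeps those whose field is owned by that source (per an ownership map), and then reassembles the kept fields in the canonical field order.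
import Mathlib
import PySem

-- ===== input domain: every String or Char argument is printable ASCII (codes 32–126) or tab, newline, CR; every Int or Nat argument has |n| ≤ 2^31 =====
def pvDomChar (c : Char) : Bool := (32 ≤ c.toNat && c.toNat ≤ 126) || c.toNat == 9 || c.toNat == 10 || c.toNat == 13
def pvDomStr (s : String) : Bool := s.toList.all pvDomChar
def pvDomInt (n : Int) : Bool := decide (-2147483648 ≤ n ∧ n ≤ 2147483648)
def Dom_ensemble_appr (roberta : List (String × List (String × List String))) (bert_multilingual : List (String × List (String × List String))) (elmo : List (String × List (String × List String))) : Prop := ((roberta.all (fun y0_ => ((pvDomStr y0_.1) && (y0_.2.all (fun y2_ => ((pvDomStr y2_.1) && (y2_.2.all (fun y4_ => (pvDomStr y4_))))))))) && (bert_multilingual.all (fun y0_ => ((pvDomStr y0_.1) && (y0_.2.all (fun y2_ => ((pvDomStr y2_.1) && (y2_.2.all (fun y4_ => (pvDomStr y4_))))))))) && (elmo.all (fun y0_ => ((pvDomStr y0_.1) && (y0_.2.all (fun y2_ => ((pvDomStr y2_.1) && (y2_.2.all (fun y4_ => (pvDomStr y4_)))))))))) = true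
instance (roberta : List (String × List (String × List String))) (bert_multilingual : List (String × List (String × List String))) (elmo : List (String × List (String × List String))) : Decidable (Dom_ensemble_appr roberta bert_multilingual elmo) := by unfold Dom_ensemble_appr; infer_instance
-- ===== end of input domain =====

-- B inverts A's traversal: instead of probing the eight fields in their source dicts, it scans each
-- source's own entries, keeps those owned by that source, and reassembles them in canonical order.

-- ===== PORT A =====
-- Literal transliteration of A: loop over roberta's keys, eight 'if field in model[sub]' branches
-- copying field by field, appending (sub, inner dict) to the result.
def ensemble_appr (roberta : List (String × List (String × List String))) (bert_multilingual : List (String × List (String × List String))) (elmo : List (String × List (String × List String))) : List (String × List (String × List String)) :=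
  roberta.foldl (fun acc p =>
    let sub := p.1
    let rd := PySem.Dict.mk (((PySem.Dict.mk roberta).get? sub).getD [])
    let bd := PySem.Dict.mk (((PySem.Dict.mk bert_multilingual).get? sub).getD [])
    let ed := PySem.Dict.mk (((PySem.Dict.mk elmo).get? sub).getD [])
    let d0 : PySem.Dict String (List String) := PySem.Dict.empty
    let d1 := if ed.contains "positive_movies" then d0.insert "positive_movies" (ed.getD "positive_movies" []) else d0
    let d2 := if rd.contains "negative_movies" then d1.insert "negative_movies" (rd.getD "negative_movies" []) else d1
    let d3 := if ed.contains "positive_genres" then d2.insert "positive_genres" (ed.getD "positive_genres" []) else d2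
    let d4 := if bd.contains "negative_genres" then d3.insert "negative_genres" (bd.getD "negative_genres" []) else d3
    let d5 := if ed.contains "positive_keywords" then d4.insert "positive_keywords" (ed.getD "positive_keywords" []) else d4
    let d6 := if rd.contains "negative_keywords" then d5.insert "negative_keywords" (rd.getD "negative_keywords" []) else d5
    let d7 := if bd.contains "positive_actors" then d6.insert "positive_actors" (bd.getD "positive_actors" []) else d6
    let d8 := if rd.contains "negative_actors" then d7.insert "negative_actors" (rd.getD "negative_actors" []) else d7
    acc ++ [(sub, d8.items)]) []

-- ===== PORT B =====
-- OWNER: which model owns each output field ("r" = roberta, "b" = bert_multilingual, "e" = elmo).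
def pvOwner : PySem.Dict String String :=
  PySem.Dict.mk [("positive_movies", "e"), ("negative_movies", "r"),
                 ("positive_genres", "e"), ("negative_genres", "b"),
                 ("positive_keywords", "e"), ("negative_keywords", "r"),
                 ("positive_actors", "b"), ("negative_actors", "r")]

def pvFieldOrder : List String :=
  ["positive_movies", "negative_movies", "positive_genres", "negative_genres",
   "positive_keywords", "negative_keywords", "positive_actors", "negative_actors"]

-- the body of B's inner scan: keep an entry iff its field is owned by the model being scanned
def pvStep (t : String) (d : PySem.Dict String (List String)) (fv : String × List String) : PySem.Dict String (List String) :=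
  if pvOwner.get? fv.1 == some t then d.insert fv.1 fv.2 else d

def ensemble_appr_alt (roberta : List (String × List (String × List String))) (bert_multilingual : List (String × List (String × List String))) (elmo : List (String × List (String × List String))) : List (String × List (String × List String)) :=
  roberta.foldl (fun acc p =>
    let sources : List (String × List (String × List String)) :=
      [("r", p.2),
       ("b", ((PySem.Dict.mk bert_multilingual).get? p.1).getD []),
       ("e", ((PySem.Dict.mk elmo).get? p.1).getD [])]
    let picked := sources.foldl (fun d tm => tm.2.foldl (pvStep tm.1) d) PySem.Dict.empty
    -- {f: picked[f] for f in FIELD_ORDER if f in picked}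
    let inner := pvFieldOrder.foldl (fun d f => if picked.contains f then d.insert f (picked.getD f []) else d) PySem.Dict.empty
    acc ++ [(p.1, inner.items)]) []

-- ===== PRECONDITION & SPEC =====
-- Pre_ excludes (a) inputs where some roberta key is missing from bert_multilingual or elmo, on
-- which A raises KeyError, and (b) association lists with duplicate keys at either level, which do
-- not represent a Python dict (Python's dict collapses them, so A never sees such an input).
def Pre_ensemble_appr (roberta : List (String × List (String × List String))) (bert_multilingual : List (String × List (String × List String))) (elmo : List (String × List (String × List String))) : Prop :=
  (roberta.map (·.1)).Nodup ∧ (bert_multilingual.map (·.1)).Nodup ∧ (elmo.map (·.1)).Nodup ∧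
  (∀ p ∈ roberta, (p.2.map (·.1)).Nodup) ∧ (∀ p ∈ bert_multilingual, (p.2.map (·.1)).Nodup) ∧
  (∀ p ∈ elmo, (p.2.map (·.1)).Nodup) ∧
  (∀ p ∈ roberta, p.1 ∈ bert_multilingual.map (·.1) ∧ p.1 ∈ elmo.map (·.1))
instance (roberta : List (String × List (String × List String))) (bert_multilingual : List (String × List (String × List String))) (elmo : List (String × List (String × List String))) : Decidable (Pre_ensemble_appr roberta bert_multilingual elmo) := by unfold Pre_ensemble_appr; infer_instance

def pvWitness_ensemble_appr : (List (String × List (String × List String))) × (List (String × List (String × List String))) × (List (String × List (String × List String))) :=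
  ([("s1", [("negative_movies", ["m1"]), ("positive_actors", ["a"])])],
   [("s1", [("negative_genres", ["g"])]), ("s2", [])],
   [("s1", [("positive_movies", ["m2"])])])

def Spec_ensemble_appr (roberta : List (String × List (String × List String))) (bert_multilingual : List (String × List (String × List String))) (elmo : List (String × List (String × List String))) (out : List (String × List (String × List String))) : Prop := out = ensemble_appr_alt roberta bert_multilingual elmo
instance (roberta : List (String × List (String × List String))) (bert_multilingual : List (String × List (String × List String))) (elmo : List (String × List (String × List String))) (out : List (String × List (String × List String))) : Decidable (Spec_ensemble_appr roberta bert_multilingual elmo out) := by unfold Spec_ensemble_appr; infer_instance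

-- ===== CLAIM (what is proved, stated in full; the proofs are below) =====
def Claim_equal_ensemble_appr : Prop := ∀ (roberta : List (String × List (String × List String))) (bert_multilingual : List (String × List (String × List String))) (elmo : List (String × List (String × List String))), Dom_ensemble_appr roberta bert_multilingual elmo → Pre_ensemble_appr roberta bert_multilingual elmo → Spec_ensemble_appr roberta bert_multilingual elmo (ensemble_appr roberta bert_multilingual elmo)

-- ===== LEMMAS AND PROOFS =====

-- B's inner scan never touches a key that is not in the scanned list.
theorem pv_fold_get?_not_mem (t : String) (l : List (String × List String)) (d : PySem.Dict String (List String)) (f : String) (h : f ∉ l.map Prod.fst) :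
    (l.foldl (pvStep t) d).get? f = d.get? f := by
  induction l generalizing d with
  | nil => rfl
  | cons hd tl ih =>
    simp only [List.map_cons, List.mem_cons, not_or] at h
    rw [List.foldl_cons, ih _ h.2]
    unfold pvStep
    split
    · exact PySem.Dict.get?_insert_of_ne _ _ h.1
    · rfl

-- What B's scan of one model (tag t, entry list l with distinct keys) leaves at key f.
theorem pv_fold_get? (t : String) (l : List (String × List String)) (d : PySem.Dict String (List String)) (f : String) (hnd : (l.map Prod.fst).Nodup) :
    (l.foldl (pvStep t) d).get? f =
      match (PySem.Dict.mk l).get? f with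
      | some v => if pvOwner.get? f == some t then some v else d.get? f
      | none => d.get? f := by
  induction l generalizing d with
  | nil => rfl
  | cons hd tl ih =>
    obtain ⟨k, vs⟩ := hd
    simp only [List.map_cons, List.nodup_cons] at hnd
    rw [List.foldl_cons, PySem.Dict.get?_mk_cons]
    by_cases hk : k = f
    · subst hk
      rw [pv_fold_get?_not_mem t tl _ k hnd.1]
      by_cases hc : (pvOwner.get? k == some t) = true
      · simp [pvStep, hc, PySem.Dict.get?_insert_self]
      · simp [pvStep, hc]
    · have hbf : (k == f) = false := by simpa using hk
      rw [ih _ hnd.2]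
      have hins : (pvStep t d (k, vs)).get? f = d.get? f := by
        unfold pvStep
        split
        · exact PySem.Dict.get?_insert_of_ne _ _ (Ne.symm hk)
        · rfl
      simp only [hbf, Bool.false_eq_true, if_false, hins]

-- ===== VERDICT (by name: the statement is the Claim_ definition above) =====
theorem ensemble_appr_spec : Claim_equal_ensemble_appr := by
  intro roberta bert elmo _ hpre
  unfold Spec_ensemble_appr
  obtain ⟨hnr, hnb, hne, hir, hib, hie, hmem⟩ := hpre
  unfold ensemble_appr ensemble_appr_alt
  rw [PySem.List.foldl_append_singleton_eq_map, PySem.List.foldl_append_singleton_eq_map]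
  apply List.map_congr_left
  intro p hp
  -- roberta[sub] is p.2
  have hr : (PySem.Dict.mk roberta).get? p.1 = some p.2 := by
    apply PySem.Dict.get?_of_mem_items
    · exact hp
    · simpa [PySem.Dict.keys] using hnr
  -- bert[sub] and elmo[sub] exist and have distinct keys
  obtain ⟨hmb, hme⟩ := hmem p hp
  obtain ⟨qb, hqb, hqb1⟩ := List.mem_map.mp hmb
  obtain ⟨qe, hqe, hqe1⟩ := List.mem_map.mp hme
  have hb : (PySem.Dict.mk bert).get? p.1 = some qb.2 := by
    apply PySem.Dict.get?_of_mem_items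
    · show (p.1, qb.2) ∈ bert
      rw [← hqb1]; exact hqb
    · simpa [PySem.Dict.keys] using hnb
  have he : (PySem.Dict.mk elmo).get? p.1 = some qe.2 := by
    apply PySem.Dict.get?_of_mem_items
    · show (p.1, qe.2) ∈ elmo
      rw [← hqe1]; exact hqe
    · simpa [PySem.Dict.keys] using hne
  set bl := qb.2 with hbl
  set el := qe.2 with hel
  have hndr : (p.2.map Prod.fst).Nodup := hir p hp
  have hndb : (bl.map Prod.fst).Nodup := hib qb hqb
  have hnde : (el.map Prod.fst).Nodup := hie qe hqe
  simp only [hr, hb, he, Option.getD_some]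
  -- characterize picked.get? at each of the eight fields
  have key : ∀ f : String,
      (el.foldl (pvStep "e") (bl.foldl (pvStep "b") (p.2.foldl (pvStep "r") PySem.Dict.empty))).get? f =
        match pvOwner.get? f with
        | some t => (PySem.Dict.mk (if t = "r" then p.2 else if t = "b" then bl else el)).get? f
        | none => none := by
    intro f
    rw [pv_fold_get? "e" el _ f hnde, pv_fold_get? "b" bl _ f hndb, pv_fold_get? "r" p.2 _ f hndr]
    cases ho : pvOwner.get? f with
    | none =>
      rcases (PySem.Dict.mk el).get? f with _ | ve <;>
        rcases (PySem.Dict.mk bl).get? f with _ | vb <;>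
        rcases (PySem.Dict.mk p.2).get? f with _ | vr <;>
        simp [PySem.Dict.get?_empty]
    | some t =>
      have ht : t = "r" ∨ t = "b" ∨ t = "e" := by
        have hm : (f, t) ∈ pvOwner.items := PySem.Dict.mem_items_of_get?_eq_some pvOwner ho
        fin_cases hm <;> simp
      rcases ht with h | h | h <;> subst h <;>
        rcases he2 : (PySem.Dict.mk el).get? f with _ | ve <;>
        rcases hb2 : (PySem.Dict.mk bl).get? f with _ | vb <;>
        rcases hr2 : (PySem.Dict.mk p.2).get? f with _ | vr <;>
        simp [PySem.Dict.get?_empty, he2, hb2, hr2]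
  have hf1 := key "positive_movies"
  have hf2 := key "negative_movies"
  have hf3 := key "positive_genres"
  have hf4 := key "negative_genres"
  have hf5 := key "positive_keywords"
  have hf6 := key "negative_keywords"
  have hf7 := key "positive_actors"
  have hf8 := key "negative_actors"
  simp only [pvOwner, PySem.Dict.get?_mk_cons, String.reduceEq, String.reduceBEq,
    Bool.false_eq_true, reduceIte] at hf1 hf2 hf3 hf4 hf5 hf6 hf7 hf8
  -- both inner dicts are the same eight-step chain
  congr 1
  apply congrArg PySem.Dict.items
  simp only [pvFieldOrder, List.foldl_cons, List.foldl_nil,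
    PySem.Dict.contains_eq_isSome_get?, PySem.Dict.getD_eq_get?_getD,
    hf1, hf2, hf3, hf4, hf5, hf6, hf7, hf8]
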